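-- pv_equiv track=rewrite | github.com/Luoimo/Kant | backend/rag/extracter/epub_extractor.py | build_section_map
-- ===== SOURCE A (Python) =====
-- TOCEntry = tuple[int, str, int]
--
-- def build_section_map(
--     toc: list[TOCEntry],
--     total_sections: int,
-- ) -> dict[int, tuple[str, str]]:
--     """
--     根据 TOC 为每个 section 生成 (章标题, 节标题)。
--
--     - 章：level == 1 的最后一个 section_index <= 当前 section 的条目
--     - 节：任意 level 的最后一个 section_index <= 当前 section 的条目
--     - 无 TOC 或越界条目时返回 ("", "")。
--     """
--     if not toc:
--         return {i: ("", "") for i in range(total_sections)}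
--
--     # 过滤越界条目
--     entries: list[TOCEntry] = [
--         (lvl, title, idx)
--         for lvl, title, idx in toc
--         if 0 <= idx < total_sections
--     ]
--
--     result: dict[int, tuple[str, str]] = {}
--     for sec_no in range(total_sections):
--         chapter_title = ""
--         section_title = ""
--         for lvl, title, start_idx in entries:
--             if start_idx <= sec_no:
--                 if lvl == 1:
--                     chapter_title = title
--                 section_title = title
--         result[sec_no] = (chapter_title, section_title)
--     return result
-- ===== SOURCE B (Python) =====
-- def build_section_map(toc, total_sections):
--     # Single reverse pass builds disjoint ascending intervals of constant title,
--     # then the result is materialised by expanding those intervals: O(|toc| + total).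
--     entries = [(lvl, title, idx) for lvl, title, idx in toc
--                if 0 <= idx < total_sections]
--
--     def intervals(ents):
--         # reverse scan: each kept entry covers [idx, cut) where cut is the
--         # smallest start index seen so far (later in the list wins).
--         res = []
--         cut = total_sections
--         for _lvl, title, idx in reversed(ents):
--             if idx < cut:
--                 res.append((idx, cut, title))
--                 cut = idx
--         res.reverse()
--         return res
--
--     def expand(ivs):
--         out = []
--         pos = 0
--         for lo, hi, title in ivs:
--             out.extend([""] * (lo - pos))
--             out.extend([title] * (hi - lo))
--             pos = hi
--         out.extend([""] * (total_sections - pos))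
--         return out
--
--     sec_titles = expand(intervals(entries))
--     chap_titles = expand(intervals([e for e in entries if e[0] == 1]))
--     return {i: (chap_titles[i], sec_titles[i]) for i in range(total_sections)}
-- ===== Notes on version B (the rewrite author's own statement) =====
-- stated objective: faster
-- what changed: Instead of rescanning the whole TOC for every section number, B makes one reverse pass over the filtered TOC building disjoint ascending (start, end, title) intervals (suffix-minimum cuts) and expands them once into the per-section title arrays.
import Mathlib
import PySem

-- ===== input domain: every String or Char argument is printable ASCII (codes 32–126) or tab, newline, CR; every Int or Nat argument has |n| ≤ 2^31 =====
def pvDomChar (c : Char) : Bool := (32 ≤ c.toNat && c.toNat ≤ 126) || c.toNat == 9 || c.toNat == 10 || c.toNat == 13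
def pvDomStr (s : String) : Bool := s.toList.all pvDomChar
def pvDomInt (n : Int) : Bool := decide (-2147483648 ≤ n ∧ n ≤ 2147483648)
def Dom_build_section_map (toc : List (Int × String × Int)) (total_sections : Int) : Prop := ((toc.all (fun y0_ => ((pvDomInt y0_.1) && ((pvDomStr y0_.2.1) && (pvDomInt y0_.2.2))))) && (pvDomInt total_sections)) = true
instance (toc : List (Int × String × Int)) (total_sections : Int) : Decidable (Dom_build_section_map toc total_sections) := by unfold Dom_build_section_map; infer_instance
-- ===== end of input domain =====

-- B replaces A's per-section rescan of the TOC by one reverse pass building constant-title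
-- intervals that are then expanded once: O(|toc| + total) instead of O(|toc| * total).

-- ===== PORT A =====
def build_section_map (toc : List (Int × String × Int)) (total_sections : Int) : List (Int × String × String) :=
  if toc = [] then
    (PySem.List.pyRange 0 total_sections 1).map (fun i => (i, "", ""))
  else
    let entries := toc.filter (fun e => decide (0 ≤ e.2.2 ∧ e.2.2 < total_sections))
    (PySem.List.pyRange 0 total_sections 1).map (fun sec_no =>
      let p := entries.foldl (fun (st : String × String) e =>
        if e.2.2 ≤ sec_no then
          ((if e.1 == 1 then e.2.1 else st.1), e.2.1)
        else st) ("", "")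
      (sec_no, p.1, p.2))

-- ===== PORT B =====
-- reverse scan collecting (lo, hi, title) intervals in scan order, reversed at the end (= res.append / res.reverse())
def pvIntervals (total : Int) (ents : List (Int × String × Int)) : List (Int × Int × String) :=
  let p := ents.reverse.foldl (fun (st : List (Int × Int × String) × Int) e =>
      if e.2.2 < st.2 then (st.1 ++ [(e.2.2, st.2, e.2.1)], e.2.2) else st) ([], total)
  p.1.reverse

-- expand ascending disjoint intervals into the full titles list (List.replicate = [x]*k)
def pvExpand (total : Int) (ivs : List (Int × Int × String)) : List String :=
  let p := ivs.foldl (fun (st : List String × Int) iv =>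
      (st.1 ++ List.replicate (iv.1 - st.2).toNat "" ++ List.replicate (iv.2.1 - iv.1).toNat iv.2.2, iv.2.1))
      ([], 0)
  p.1 ++ List.replicate (total - p.2).toNat ""

def build_section_map_alt (toc : List (Int × String × Int)) (total_sections : Int) : List (Int × String × String) :=
  let entries := toc.filter (fun e => decide (0 ≤ e.2.2 ∧ e.2.2 < total_sections))
  let sec_titles := pvExpand total_sections (pvIntervals total_sections entries)
  let chap_titles := pvExpand total_sections (pvIntervals total_sections (entries.filter (fun e => e.1 == 1)))
  (PySem.List.pyRange 0 total_sections 1).map (fun i =>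
    (i, (PySem.List.pyGet? chap_titles i).getD "", (PySem.List.pyGet? sec_titles i).getD ""))
    -- indexing chap_titles[i]/sec_titles[i]: i is in range (lists have length total_sections), .getD "" is unreachable

-- ===== PRECONDITION & SPEC =====
def Spec_build_section_map (toc : List (Int × String × Int)) (total_sections : Int) (out : List (Int × String × String)) : Prop := out = build_section_map_alt toc total_sections
instance (toc : List (Int × String × Int)) (total_sections : Int) (out : List (Int × String × String)) : Decidable (Spec_build_section_map toc total_sections out) := by unfold Spec_build_section_map; infer_instance

-- ===== CLAIM (what is proved, stated in full; the proofs are below) =====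
def Claim_equal_build_section_map : Prop := ∀ (toc : List (Int × String × Int)) (total_sections : Int), Dom_build_section_map toc total_sections → Spec_build_section_map toc total_sections (build_section_map toc total_sections)

-- ===== LEMMAS AND PROOFS =====

-- reference value: title of the LAST entry (of M.reverse, i.e. first of M) with start_idx <= s
def lastSec (M : List (Int × String × Int)) (s : Int) : String :=
  match M.find? (fun e => decide (e.2.2 ≤ s)) with
  | some e => e.2.1
  | none => ""

-- recursive form of pvIntervals' scan (input already reversed), in scan order (descending)
def ivRec (cut : Int) : List (Int × String × Int) → List (Int × Int × String)
  | [] => []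
  | e :: rest => if e.2.2 < cut then (e.2.2, cut, e.2.1) :: ivRec e.2.2 rest else ivRec cut rest

-- recursive form of pvExpand
def expandRec (total : Int) (pos : Int) : List (Int × Int × String) → List String
  | [] => List.replicate (total - pos).toNat ""
  | iv :: rest => List.replicate (iv.1 - pos).toNat "" ++ List.replicate (iv.2.1 - iv.1).toNat iv.2.2
      ++ expandRec total iv.2.1 rest

-- ascending chain of intervals starting at ≥ pos and ending at ≤ b
def Chain (pos b : Int) : List (Int × Int × String) → Prop
  | [] => pos ≤ b
  | iv :: rest => pos ≤ iv.1 ∧ iv.1 ≤ iv.2.1 ∧ Chain iv.2.1 b rest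

-- which interval (if any) contains s
def lookup (ivs : List (Int × Int × String)) (s : Int) : String :=
  match ivs.find? (fun iv => decide (iv.1 ≤ s ∧ s < iv.2.1)) with
  | some iv => iv.2.2
  | none => ""

theorem iv_fold (M : List (Int × String × Int)) : ∀ (res : List (Int × Int × String)) (cut : Int),
    (M.foldl (fun (st : List (Int × Int × String) × Int) e =>
      if e.2.2 < st.2 then (st.1 ++ [(e.2.2, st.2, e.2.1)], e.2.2) else st) (res, cut)).1
      = res ++ ivRec cut M := by
  induction M with
  | nil => intro res cut; simp [ivRec]
  | cons e M ih =>
    intro res cut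
    simp only [List.foldl_cons, ivRec]
    by_cases h : e.2.2 < cut
    · simp [h, ih]
    · simp [h, ih]

theorem pvIntervals_eq_ivRec (total : Int) (ents : List (Int × String × Int)) :
    pvIntervals total ents = (ivRec total ents.reverse).reverse := by
  show ((ents.reverse.foldl (fun (st : List (Int × Int × String) × Int) e =>
      if e.2.2 < st.2 then (st.1 ++ [(e.2.2, st.2, e.2.1)], e.2.2) else st) ([], total)).1).reverse
      = (ivRec total ents.reverse).reverse
  rw [iv_fold, List.nil_append]

theorem ex_fold (total : Int) (ivs : List (Int × Int × String)) :
    ∀ (acc : List String) (pos : Int),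
    (ivs.foldl (fun (st : List String × Int) iv =>
      (st.1 ++ List.replicate (iv.1 - st.2).toNat "" ++ List.replicate (iv.2.1 - iv.1).toNat iv.2.2, iv.2.1))
      (acc, pos)).1
      ++ List.replicate (total - (ivs.foldl (fun (st : List String × Int) iv =>
      (st.1 ++ List.replicate (iv.1 - st.2).toNat "" ++ List.replicate (iv.2.1 - iv.1).toNat iv.2.2, iv.2.1))
      (acc, pos)).2).toNat ""
      = acc ++ expandRec total pos ivs := by
  induction ivs with
  | nil => intro acc pos; simp [expandRec]
  | cons iv ivs ih =>
    intro acc pos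
    simp only [List.foldl_cons]
    rw [ih]
    simp [expandRec]

theorem pvExpand_eq_expandRec (total : Int) (ivs : List (Int × Int × String)) :
    pvExpand total ivs = expandRec total 0 ivs := by
  have h := ex_fold total ivs [] 0
  simpa [pvExpand] using h

theorem chain_le (R : List (Int × Int × String)) (pos b : Int) (h : Chain pos b R) : pos ≤ b := by
  induction R generalizing pos with
  | nil => exact h
  | cons iv R ih =>
    obtain ⟨h1, h2, h3⟩ := h
    have := ih iv.2.1 h3
    omega

theorem chain_append (R : List (Int × Int × String)) (pos b lo hi : Int) (t : String)
    (h : Chain pos lo R) (h1 : lo ≤ hi) (h2 : hi ≤ b) : Chain pos b (R ++ [(lo, hi, t)]) := by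
  induction R generalizing pos with
  | nil => exact ⟨h, h1, h2⟩
  | cons iv R ih =>
    obtain ⟨ha, hb, hc⟩ := h
    exact ⟨ha, hb, ih iv.2.1 hc⟩

theorem ivRec_chain (M : List (Int × String × Int)) (cut : Int)
    (hc : 0 ≤ cut) (hM : ∀ e ∈ M, 0 ≤ e.2.2) : Chain 0 cut ((ivRec cut M).reverse) := by
  induction M generalizing cut with
  | nil => exact hc
  | cons e M ih =>
    have he : 0 ≤ e.2.2 := hM e (List.mem_cons_self ..)
    have hM' : ∀ x ∈ M, 0 ≤ x.2.2 := fun x hx => hM x (List.mem_cons_of_mem _ hx)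
    by_cases h : e.2.2 < cut
    · simp only [ivRec, if_pos h, List.reverse_cons]
      exact chain_append _ _ _ _ _ _ (ih e.2.2 he hM') (le_of_lt h) le_rfl
    · simp only [ivRec, if_neg h]
      exact ih cut hc hM'

theorem lookup_none_of_ge (R : List (Int × Int × String)) (pos b s : Int)
    (h : Chain pos b R) (hs : b ≤ s) :
    R.find? (fun iv => decide (iv.1 ≤ s ∧ s < iv.2.1)) = none := by
  induction R generalizing pos with
  | nil => rfl
  | cons iv R ih =>
    obtain ⟨h1, h2, h3⟩ := h
    have hb : iv.2.1 ≤ b := chain_le _ _ _ h3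
    rw [List.find?_cons_of_neg (by simp only [decide_eq_true_eq]; omega)]
    exact ih iv.2.1 h3

theorem lookup_none_of_lt (R : List (Int × Int × String)) (pos b s : Int)
    (h : Chain pos b R) (hs : s < pos) :
    R.find? (fun iv => decide (iv.1 ≤ s ∧ s < iv.2.1)) = none := by
  induction R generalizing pos with
  | nil => rfl
  | cons iv R ih =>
    obtain ⟨h1, h2, h3⟩ := h
    rw [List.find?_cons_of_neg (by simp only [decide_eq_true_eq]; omega)]
    exact ih iv.2.1 h3 (by omega)

theorem lastSec_cons_of_le (e : Int × String × Int) (M : List (Int × String × Int)) (s : Int)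
    (h : e.2.2 ≤ s) : lastSec (e :: M) s = e.2.1 := by
  have hf : List.find? (fun e => decide (e.2.2 ≤ s)) (e :: M) = some e :=
    List.find?_cons_of_pos (by simpa using h)
  simp only [lastSec, hf]

theorem lastSec_cons_of_gt (e : Int × String × Int) (M : List (Int × String × Int)) (s : Int)
    (h : ¬ e.2.2 ≤ s) : lastSec (e :: M) s = lastSec M s := by
  have hf : List.find? (fun e => decide (e.2.2 ≤ s)) (e :: M)
      = List.find? (fun e => decide (e.2.2 ≤ s)) M :=
    List.find?_cons_of_neg (by simpa using h)
  simp only [lastSec, hf]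

theorem lookup_ivRec (M : List (Int × String × Int)) (cut s : Int)
    (hM : ∀ e ∈ M, 0 ≤ e.2.2) (_hs0 : 0 ≤ s) (hs : s < cut) :
    lookup ((ivRec cut M).reverse) s = lastSec M s := by
  induction M generalizing cut with
  | nil => rfl
  | cons e M ih =>
    have he : 0 ≤ e.2.2 := hM e (List.mem_cons_self ..)
    have hM' : ∀ x ∈ M, 0 ≤ x.2.2 := fun x hx => hM x (List.mem_cons_of_mem _ hx)
    by_cases h : e.2.2 < cut
    · simp only [ivRec, if_pos h, List.reverse_cons]
      by_cases hle : e.2.2 ≤ s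
      · have hnone := lookup_none_of_ge ((ivRec e.2.2 M).reverse) 0 e.2.2 s
          (ivRec_chain M e.2.2 he hM') hle
        have hone : List.find? (fun iv => decide (iv.1 ≤ s ∧ s < iv.2.1)) [(e.2.2, cut, e.2.1)]
            = some (e.2.2, cut, e.2.1) :=
          List.find?_cons_of_pos (by simp only [decide_eq_true_eq]; omega)
        rw [lastSec_cons_of_le _ _ _ hle]
        simp only [lookup, List.find?_append, hnone, Option.none_or, hone]
      · have hs' : s < e.2.2 := by omega
        have hone : List.find? (fun iv => decide (iv.1 ≤ s ∧ s < iv.2.1)) [(e.2.2, cut, e.2.1)]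
            = none := by
          rw [List.find?_cons_of_neg (by simp only [decide_eq_true_eq]; omega)]
          rfl
        rw [lastSec_cons_of_gt _ _ _ hle, ← ih e.2.2 hM' hs']
        simp only [lookup, List.find?_append, hone, Option.or_none]
    · simp only [ivRec, if_neg h]
      have hle : ¬ e.2.2 ≤ s := by omega
      rw [lastSec_cons_of_gt _ _ _ hle]
      exact ih cut hM' hs

theorem expandRec_get (ivs : List (Int × Int × String)) (total : Int) (pos : Int) (k : Nat)
    (h : Chain pos total ivs) (hk : (pos + k : Int) < total) :
    (expandRec total pos ivs)[k]? = some (lookup ivs (pos + k)) := by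
  induction ivs generalizing pos k with
  | nil =>
    have hlt : k < (total - pos).toNat := by omega
    simp [expandRec, lookup, hlt]
  | cons iv ivs ih =>
    obtain ⟨h1, h2, h3⟩ := h
    simp only [expandRec]
    by_cases c1 : (pos + k : Int) < iv.1
    · rw [List.getElem?_append_left (by simp only [List.length_append, List.length_replicate]; omega),
        List.getElem?_append_left (by simp only [List.length_replicate]; omega)]
      have hnone := lookup_none_of_lt ivs iv.2.1 total (pos + k) h3 (by omega)
      have hf : List.find? (fun x => decide (x.1 ≤ pos + (k:Int) ∧ pos + (k:Int) < x.2.1)) (iv :: ivs)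
          = List.find? (fun x => decide (x.1 ≤ pos + (k:Int) ∧ pos + (k:Int) < x.2.1)) ivs :=
        List.find?_cons_of_neg (by simp only [decide_eq_true_eq]; omega)
      have hlt : k < (iv.1 - pos).toNat := by omega
      simp only [lookup, hf, hnone, List.getElem?_replicate, if_pos hlt]
    · by_cases c2 : (pos + k : Int) < iv.2.1
      · rw [List.getElem?_append_left (by simp only [List.length_append, List.length_replicate]; omega),
          List.getElem?_append_right (by simp only [List.length_replicate]; omega)]
        have hf : List.find? (fun x => decide (x.1 ≤ pos + (k:Int) ∧ pos + (k:Int) < x.2.1)) (iv :: ivs)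
            = some iv :=
          List.find?_cons_of_pos (by simp only [decide_eq_true_eq]; omega)
        have hlt : k - (List.replicate (iv.1 - pos).toNat "").length < (iv.2.1 - iv.1).toNat := by
          simp only [List.length_replicate]; omega
        simp only [lookup, hf, List.getElem?_replicate, if_pos hlt]
      · rw [List.getElem?_append_right (by simp only [List.length_append, List.length_replicate]; omega)]
        have harith : (iv.2.1 + ((k - (List.replicate (iv.1 - pos).toNat ""
            ++ List.replicate (iv.2.1 - iv.1).toNat iv.2.2).length : Nat)) : Int) = pos + k := by
          simp only [List.length_append, List.length_replicate]; omega
        have hf : List.find? (fun x => decide (x.1 ≤ pos + (k:Int) ∧ pos + (k:Int) < x.2.1)) (iv :: ivs)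
            = List.find? (fun x => decide (x.1 ≤ pos + (k:Int) ∧ pos + (k:Int) < x.2.1)) ivs :=
          List.find?_cons_of_neg (by simp only [decide_eq_true_eq]; omega)
        rw [ih _ _ h3 (by rw [harith]; omega), harith]
        simp only [lookup, hf]

theorem foldA_eq (L : List (Int × String × Int)) (s : Int) :
    L.foldl (fun (st : String × String) e =>
        if e.2.2 ≤ s then ((if e.1 == 1 then e.2.1 else st.1), e.2.1) else st) ("", "") =
      (lastSec (L.reverse.filter (fun e => e.1 == 1)) s, lastSec L.reverse s) := by
  induction L using List.reverseRecOn with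
  | nil => simp [lastSec]
  | append_singleton L e ih =>
    rw [List.foldl_append, ih]
    simp only [List.foldl_cons, List.foldl_nil, List.reverse_append, List.reverse_singleton,
      List.singleton_append, List.filter_cons]
    by_cases hlvl : e.1 == 1
    · simp only [hlvl, if_pos]
      by_cases hle : e.2.2 ≤ s
      · simp [hle, lastSec_cons_of_le _ _ _ hle]
      · simp [hle, lastSec_cons_of_gt _ _ _ hle]
    · simp only [hlvl, Bool.false_eq_true, if_false]
      by_cases hle : e.2.2 ≤ s
      · simp [hle, lastSec_cons_of_le _ _ _ hle]
      · simp [hle, lastSec_cons_of_gt _ _ _ hle]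

theorem b_lookup (total s : Int) (L : List (Int × String × Int))
    (hL : ∀ e ∈ L, 0 ≤ e.2.2) (hs0 : 0 ≤ s) (hs : s < total) :
    (PySem.List.pyGet? (pvExpand total (pvIntervals total L)) s).getD "" = lastSec L.reverse s := by
  have htot : (0:Int) ≤ total := by omega
  have hMrev : ∀ e ∈ L.reverse, 0 ≤ e.2.2 := fun e he => hL e (List.mem_reverse.mp he)
  rw [pvIntervals_eq_ivRec, pvExpand_eq_expandRec]
  rw [show s = ((s.toNat : Nat) : Int) by omega, PySem.List.pyGet?_natCast]
  have hst : (0 + (s.toNat : Int)) = s := by omega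
  have hg := expandRec_get ((ivRec total L.reverse).reverse) total 0 s.toNat
    (ivRec_chain L.reverse total htot hMrev) (by omega)
  rw [hg, hst, lookup_ivRec L.reverse total s hMrev hs0 hs,
    show ((s.toNat : Nat) : Int) = s by omega]
  rfl

-- ===== VERDICT (by name: the statement is the Claim_ definition above) =====
theorem build_section_map_spec : Claim_equal_build_section_map := by
  intro toc total _dom
  unfold Spec_build_section_map build_section_map build_section_map_alt
  by_cases htoc : toc = []
  · subst htoc
    simp only [List.filter_nil]
    apply List.map_congr_left
    intro i hi
    obtain ⟨hi0, hi1⟩ := (PySem.List.mem_pyRange_one).mp hi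
    rw [b_lookup total i [] (by simp) hi0 hi1]
    rfl
  · rw [if_neg htoc]
    apply List.map_congr_left
    intro s hsmem
    obtain ⟨hs0, hs1⟩ := (PySem.List.mem_pyRange_one).mp hsmem
    have hL : ∀ e ∈ toc.filter (fun e => decide (0 ≤ e.2.2 ∧ e.2.2 < total)), 0 ≤ e.2.2 := by
      intro e he
      have := (List.mem_filter.mp he).2
      simp only [decide_eq_true_eq] at this
      exact this.1
    have hLf : ∀ e ∈ (toc.filter (fun e => decide (0 ≤ e.2.2 ∧ e.2.2 < total))).filter
        (fun e => e.1 == 1), 0 ≤ e.2.2 := by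
      intro e he
      exact hL e (List.mem_filter.mp he).1
    rw [foldA_eq]
    rw [b_lookup total s _ hL hs0 hs1, b_lookup total s _ hLf hs0 hs1]
    rw [List.filter_reverse]
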